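-- pv_equiv track=rewrite | github.com/Dev130/gfg_problems | potd_7June25.py | longestCommonSum
-- ===== SOURCE A (Python) =====
-- def longestCommonSum(a1, a2):
--     n = len(a1)
--     diff_map = {0: -1}  # diff -> first index where it occurs
--     max_len = 0
--     sum1 = sum2 = 0
--
--     for i in range(n):
--         sum1 += a1[i]
--         sum2 += a2[i]
--
--         curr_diff = sum1 - sum2
--
--         if curr_diff in diff_map:
--             # If we've seen this difference before, update max_len
--             span_length = i - diff_map[curr_diff]
--             if span_length > max_len:
--                 max_len = span_length
--         else:
--             # Store first occurrence of this difference
--             diff_map[curr_diff] = i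
--
--     return max_len
-- ===== SOURCE B (Python) =====
-- def longestCommonSum(a1, a2):
--     n = len(a1)
--     max_len = 0
--     for i in range(n):
--         s1 = s2 = 0
--         for j in range(i, n):
--             s1 += a1[j]
--             s2 += a2[j]
--             if s1 == s2:
--                 max_len = max(max_len, j - i + 1)
--     return max_len
-- ===== Notes on version B (the rewrite author's own statement) =====
-- stated objective: simpler
-- what changed: Replaced the prefix-difference hashmap single pass with a plain brute-force double loop (for each start index, extend the end index with running sums and record equal-sum spans), maintaining no dictionary and no prefix map.
import Mathlib
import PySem

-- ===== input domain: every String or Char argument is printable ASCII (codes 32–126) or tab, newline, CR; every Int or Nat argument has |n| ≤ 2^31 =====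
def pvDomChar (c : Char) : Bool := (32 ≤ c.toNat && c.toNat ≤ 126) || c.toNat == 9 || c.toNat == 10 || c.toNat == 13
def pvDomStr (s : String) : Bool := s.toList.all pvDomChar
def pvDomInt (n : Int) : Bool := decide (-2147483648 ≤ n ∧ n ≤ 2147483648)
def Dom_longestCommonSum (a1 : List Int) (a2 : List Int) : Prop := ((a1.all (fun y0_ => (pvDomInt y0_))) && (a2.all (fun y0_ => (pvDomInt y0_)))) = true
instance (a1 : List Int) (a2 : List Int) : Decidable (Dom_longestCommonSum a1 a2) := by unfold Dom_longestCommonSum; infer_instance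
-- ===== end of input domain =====

-- B replaces A's prefix-difference hashmap pass with a brute-force double loop over all
-- start indices (simpler: no dictionary, no prefix map); return values proved equal on Pre_.

-- ===== PORT A =====
-- (indexing a1[i]/a2[i] is ported with pyGetD; Pre_ below excludes exactly the inputs
--  where Python's a2[i] would raise IndexError, so the default is never consulted there)
def longestCommonSum (a1 : List Int) (a2 : List Int) : Int :=
  let n : Int := PySem.List.len a1
  let r := (PySem.List.pyRange 0 n 1).foldl
    (fun (st : PySem.Dict Int Int × Int × Int × Int) (i : Int) =>
      let s1 := st.2.2.1 + PySem.List.pyGetD a1 i 0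
      let s2 := st.2.2.2 + PySem.List.pyGetD a2 i 0
      let cd := s1 - s2
      if st.1.contains cd then
        let span := i - st.1.getD cd 0
        (st.1, if span > st.2.1 then span else st.2.1, s1, s2)
      else
        (st.1.insert cd i, st.2.1, s1, s2))
    (PySem.Dict.empty.insert 0 (-1), 0, 0, 0)
  r.2.1

-- ===== PORT B =====
def longestCommonSum_alt (a1 : List Int) (a2 : List Int) : Int :=
  let n : Int := PySem.List.len a1
  (PySem.List.pyRange 0 n 1).foldl
    (fun (ml : Int) (i : Int) =>
      ((PySem.List.pyRange i n 1).foldl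
        (fun (st : Int × Int × Int) (j : Int) =>
          let s1 := st.2.1 + PySem.List.pyGetD a1 j 0
          let s2 := st.2.2 + PySem.List.pyGetD a2 j 0
          (if s1 = s2 then max st.1 (j - i + 1) else st.1, s1, s2))
        (ml, 0, 0)).1)
    0

-- ===== PRECONDITION & SPEC =====
-- Pre_ excludes exactly the inputs where Python A raises IndexError: A reads a2[i] for
-- every i < len(a1), so it raises iff len(a2) < len(a1); B indexes the same way.
def Pre_longestCommonSum (a1 : List Int) (a2 : List Int) : Prop := a1.length ≤ a2.length
instance (a1 : List Int) (a2 : List Int) : Decidable (Pre_longestCommonSum a1 a2) := by unfold Pre_longestCommonSum; infer_instance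
def pvWitness_longestCommonSum : List Int × List Int := ([1, 0, 1], [0, 1, 1])
def Spec_longestCommonSum (a1 : List Int) (a2 : List Int) (out : Int) : Prop := out = longestCommonSum_alt a1 a2
instance (a1 : List Int) (a2 : List Int) (out : Int) : Decidable (Spec_longestCommonSum a1 a2 out) := by unfold Spec_longestCommonSum; infer_instance

-- ===== CLAIM (what is proved, stated in full; the proofs are below) =====
def Claim_equal_longestCommonSum : Prop := ∀ (a1 : List Int) (a2 : List Int), Dom_longestCommonSum a1 a2 → Pre_longestCommonSum a1 a2 → Spec_longestCommonSum a1 a2 (longestCommonSum a1 a2)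

-- ===== LEMMAS AND PROOFS =====

-- prefix sums and prefix differences
def pvPref (l : List Int) (k : ℕ) : Int := (l.take k).sum

def pvD (a1 a2 : List Int) (k : ℕ) : Int := pvPref a1 k - pvPref a2 k

-- first index whose prefix difference equals that of q
def pvFirst (a1 a2 : List Int) (q : ℕ) : ℕ :=
  Nat.find (show ∃ p, pvD a1 a2 p = pvD a1 a2 q from ⟨q, rfl⟩)

-- A's max_len after k loop iterations
def pvM (a1 a2 : List Int) : ℕ → Int
  | 0 => 0
  | k+1 => max (pvM a1 a2 k) ((k+1 : Int) - (pvFirst a1 a2 (k+1) : Int))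

-- B's inner-loop accumulator after t inner iterations starting at i
def pvBI (a1 a2 : List Int) (i : ℕ) (ml : Int) : ℕ → Int
  | 0 => ml
  | t+1 => if pvD a1 a2 (i+t+1) = pvD a1 a2 i
           then max (pvBI a1 a2 i ml t) ((t : Int)+1) else pvBI a1 a2 i ml t

-- B's outer accumulator after i outer iterations (inner loop runs n - i steps)
def pvW (a1 a2 : List Int) (n : ℕ) : ℕ → Int
  | 0 => 0
  | i+1 => pvBI a1 a2 i (pvW a1 a2 n i) (n - i)

-- A's loop body, as a named function (definitionally equal to the lambda in the port)
def pvStepA (a1 a2 : List Int) (st : PySem.Dict Int Int × Int × Int × Int) (i : Int) :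
    PySem.Dict Int Int × Int × Int × Int :=
  let s1 := st.2.2.1 + PySem.List.pyGetD a1 i 0
  let s2 := st.2.2.2 + PySem.List.pyGetD a2 i 0
  let cd := s1 - s2
  if st.1.contains cd then
    let span := i - st.1.getD cd 0
    (st.1, if span > st.2.1 then span else st.2.1, s1, s2)
  else
    (st.1.insert cd i, st.2.1, s1, s2)

-- B's inner-loop body, as a named function (definitionally equal to the lambda in the port)
def pvStepB (a1 a2 : List Int) (i : Int) (st : Int × Int × Int) (j : Int) : Int × Int × Int :=
  let s1 := st.2.1 + PySem.List.pyGetD a1 j 0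
  let s2 := st.2.2 + PySem.List.pyGetD a2 j 0
  (if s1 = s2 then max st.1 (j - i + 1) else st.1, s1, s2)

-- the common characterisation: x is the maximum of 0 and all equal-prefix-difference span lengths
def pvGood (a1 a2 : List Int) (n : ℕ) (x : Int) : Prop :=
  (x = 0 ∨ ∃ p q : ℕ, p < q ∧ q ≤ n ∧ pvD a1 a2 p = pvD a1 a2 q ∧ x = (q : Int) - (p : Int))
  ∧ ∀ p q : ℕ, p < q → q ≤ n → pvD a1 a2 p = pvD a1 a2 q → (q : Int) - (p : Int) ≤ x

lemma pvPref_succ (l : List Int) (k : ℕ) :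
    pvPref l (k+1) = pvPref l k + PySem.List.pyGetD l (k : Int) 0 := by
  unfold pvPref
  rw [PySem.List.pyGetD_natCast, List.take_add_one]
  simp [List.getD_eq_getElem?_getD]
  cases l[k]? <;> simp

lemma pvD_zero (a1 a2 : List Int) : pvD a1 a2 0 = 0 := by simp [pvD, pvPref]

lemma pvFirst_le (a1 a2 : List Int) (q : ℕ) : pvFirst a1 a2 q ≤ q := Nat.find_le rfl

lemma pvFirst_spec (a1 a2 : List Int) (q : ℕ) :
    pvD a1 a2 (pvFirst a1 a2 q) = pvD a1 a2 q :=
  Nat.find_spec (show ∃ p, pvD a1 a2 p = pvD a1 a2 q from ⟨q, rfl⟩)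

lemma pvFirst_min (a1 a2 : List Int) {p q : ℕ} (h : pvD a1 a2 p = pvD a1 a2 q) :
    pvFirst a1 a2 q ≤ p := Nat.find_le h

lemma pvFirst_congr (a1 a2 : List Int) {p q : ℕ} (h : pvD a1 a2 p = pvD a1 a2 q) :
    pvFirst a1 a2 p = pvFirst a1 a2 q := by
  refine le_antisymm (pvFirst_min a1 a2 ?_) (pvFirst_min a1 a2 ?_)
  · rw [pvFirst_spec, h]
  · rw [pvFirst_spec, ← h]

lemma pvFirst_eq_self (a1 a2 : List Int) {k : ℕ}
    (h : ¬ ∃ p, p ≤ k ∧ pvD a1 a2 p = pvD a1 a2 (k+1)) : pvFirst a1 a2 (k+1) = k+1 := by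
  have h1 := pvFirst_le a1 a2 (k+1)
  rcases Nat.lt_or_ge (pvFirst a1 a2 (k+1)) (k+1) with h2 | h2
  · exact absurd ⟨pvFirst a1 a2 (k+1), Nat.lt_succ_iff.mp h2, pvFirst_spec a1 a2 (k+1)⟩ h
  · omega

lemma pvM_nonneg (a1 a2 : List Int) (k : ℕ) : 0 ≤ pvM a1 a2 k := by
  induction k with
  | zero => simp [pvM]
  | succ k ih => exact le_trans ih (by simp [pvM])

-- A's fold over the first k indices: dictionary spec + running values
lemma A_run (a1 a2 : List Int) (k : ℕ) :
    ∃ dm : PySem.Dict Int Int,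
      (List.range k).foldl (fun st (j : ℕ) => pvStepA a1 a2 st (j : Int))
        (PySem.Dict.empty.insert 0 (-1), 0, 0, 0)
      = (dm, pvM a1 a2 k, pvPref a1 k, pvPref a2 k)
      ∧ (∀ v : Int, dm.contains v = true ↔ ∃ p, p ≤ k ∧ pvD a1 a2 p = v)
      ∧ (∀ q, q ≤ k → dm.getD (pvD a1 a2 q) 0 = (pvFirst a1 a2 q : Int) - 1) := by
  induction k with
  | zero =>
    refine ⟨PySem.Dict.empty.insert 0 (-1), by simp [pvM, pvPref], ?_, ?_⟩
    · intro v
      rw [PySem.Dict.contains_insert]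
      simp only [PySem.Dict.contains_empty, Bool.or_false, beq_iff_eq]
      constructor
      · intro h; exact ⟨0, le_refl 0, by rw [pvD_zero, h]⟩
      · rintro ⟨p, hp, hd⟩
        have : p = 0 := Nat.le_zero.mp hp
        subst this; rw [← hd, pvD_zero]
    · intro q hq
      have : q = 0 := Nat.le_zero.mp hq
      subst this
      have h0 : pvFirst a1 a2 0 = 0 := Nat.le_zero.mp (pvFirst_le a1 a2 0)
      rw [pvD_zero, h0, PySem.Dict.getD_insert_self]
      rfl
  | succ k ih =>
    obtain ⟨dm, hrun, hcont, hgetD⟩ := ih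
    rw [List.range_succ, List.foldl_append, hrun, List.foldl_cons, List.foldl_nil]
    have hcd : pvPref a1 k + PySem.List.pyGetD a1 (k : Int) 0
        - (pvPref a2 k + PySem.List.pyGetD a2 (k : Int) 0) = pvD a1 a2 (k+1) := by
      rw [← pvPref_succ, ← pvPref_succ]; rfl
    by_cases hc : ∃ p, p ≤ k ∧ pvD a1 a2 p = pvD a1 a2 (k+1)
    · obtain ⟨p, hpk, hdp⟩ := hc
      have hcontains : dm.contains (pvD a1 a2 (k+1)) = true := (hcont _).mpr ⟨p, hpk, hdp⟩
      have hget : dm.getD (pvD a1 a2 (k+1)) 0 = (pvFirst a1 a2 (k+1) : Int) - 1 := by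
        rw [← hdp, hgetD p hpk, pvFirst_congr a1 a2 hdp]
      refine ⟨dm, ?_, ?_, ?_⟩
      · simp only [pvStepA, hcd, hcontains, if_true, hget]
        have hml : (if (k : Int) - ((pvFirst a1 a2 (k+1) : Int) - 1) > pvM a1 a2 k
                then (k : Int) - ((pvFirst a1 a2 (k+1) : Int) - 1) else pvM a1 a2 k)
            = pvM a1 a2 (k+1) := by
          have hspan : (k : Int) - ((pvFirst a1 a2 (k+1) : Int) - 1)
              = ((k+1 : ℕ) : Int) - (pvFirst a1 a2 (k+1) : Int) := by push_cast; ring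
          rw [hspan]
          show _ = max (pvM a1 a2 k) _
          rw [max_def]
          split_ifs <;> omega
        rw [hml, ← pvPref_succ, ← pvPref_succ]
      · intro v
        rw [hcont v]
        constructor
        · rintro ⟨p', hp', hd'⟩; exact ⟨p', Nat.le_succ_of_le hp', hd'⟩
        · rintro ⟨p', hp', hd'⟩
          rcases Nat.lt_succ_iff_lt_or_eq.mp (Nat.lt_succ_of_le hp') with h | h
          · exact ⟨p', Nat.lt_succ_iff.mp h, hd'⟩
          · subst h; exact ⟨p, hpk, by rw [hdp, hd']⟩
      · intro q hq
        rcases Nat.le_succ_iff.mp hq with h | h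
        · exact hgetD q h
        · subst h
          rw [← hdp, hgetD p hpk, pvFirst_congr a1 a2 hdp]
    · have hcontains : dm.contains (pvD a1 a2 (k+1)) = false := by
        rcases Bool.eq_false_or_eq_true (dm.contains (pvD a1 a2 (k+1))) with h | h
        · exact absurd ((hcont _).mp h) hc
        · exact h
      have hfirst : pvFirst a1 a2 (k+1) = k+1 := pvFirst_eq_self a1 a2 hc
      refine ⟨dm.insert (pvD a1 a2 (k+1)) (k : Int), ?_, ?_, ?_⟩
      · simp only [pvStepA, hcd, hcontains]
        rw [if_neg (by simp)]
        have : pvM a1 a2 k = pvM a1 a2 (k+1) := by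
          have h0 := pvM_nonneg a1 a2 k
          show pvM a1 a2 k = max (pvM a1 a2 k) _
          rw [hfirst, max_eq_left (by push_cast; omega)]
        rw [this, ← pvPref_succ, ← pvPref_succ]
      · intro v
        rw [PySem.Dict.contains_insert]
        simp only [Bool.or_eq_true, beq_iff_eq, hcont v]
        constructor
        · rintro (h | ⟨p', hp', hd'⟩)
          · exact ⟨k+1, le_refl _, h.symm⟩
          · exact ⟨p', Nat.le_succ_of_le hp', hd'⟩
        · rintro ⟨p', hp', hd'⟩
          rcases Nat.le_succ_iff.mp hp' with h | h
          · exact Or.inr ⟨p', h, hd'⟩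
          · subst h; exact Or.inl hd'.symm
      · intro q hq
        by_cases hdq : pvD a1 a2 q = pvD a1 a2 (k+1)
        · rw [hdq, PySem.Dict.getD_insert_self, pvFirst_congr a1 a2 hdq, hfirst]
          push_cast; ring
        · have hq' : q ≤ k := by
            rcases Nat.le_succ_iff.mp hq with h | h
            · exact h
            · subst h; exact absurd rfl hdq
          rw [PySem.Dict.getD_insert, if_neg hdq]
          exact hgetD q hq'

lemma A_eq_pvM (a1 a2 : List Int) : longestCommonSum a1 a2 = pvM a1 a2 a1.length := by
  obtain ⟨dm, hrun, -, -⟩ := A_run a1 a2 a1.length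
  show ((PySem.List.pyRange 0 (PySem.List.len a1) 1).foldl
      (fun st i => pvStepA a1 a2 st i)
      (PySem.Dict.empty.insert 0 (-1), 0, 0, 0)).2.1 = pvM a1 a2 a1.length
  rw [PySem.List.len, PySem.List.pyRange_one]
  simp only [sub_zero, Int.toNat_natCast, List.foldl_map, zero_add]
  rw [hrun]

-- B's inner fold over t steps starting at i
lemma B_inner_run (a1 a2 : List Int) (i : ℕ) (ml : Int) (t : ℕ) :
    (List.range t).foldl (fun st (u : ℕ) => pvStepB a1 a2 (i : Int) st ((i : Int) + (u : Int)))
      (ml, 0, 0)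
    = (pvBI a1 a2 i ml t, pvPref a1 (i+t) - pvPref a1 i, pvPref a2 (i+t) - pvPref a2 i) := by
  induction t with
  | zero => simp [pvBI]
  | succ t ih =>
    rw [List.range_succ, List.foldl_append, ih, List.foldl_cons, List.foldl_nil]
    have he : i + (t+1) = (i + t) + 1 := by omega
    rw [he]
    have hc : ((i : Int) + (t : Int)) = ((i + t : ℕ) : Int) := by push_cast; ring
    have h1 : pvPref a1 (i+t) - pvPref a1 i + PySem.List.pyGetD a1 ((i : Int) + (t : Int)) 0
        = pvPref a1 (i+t+1) - pvPref a1 i := by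
      rw [hc, pvPref_succ a1 (i+t)]; ring
    have h2 : pvPref a2 (i+t) - pvPref a2 i + PySem.List.pyGetD a2 ((i : Int) + (t : Int)) 0
        = pvPref a2 (i+t+1) - pvPref a2 i := by
      rw [hc, pvPref_succ a2 (i+t)]; ring
    have hidx : (i : Int) + (t : Int) - (i : Int) + 1 = (t : Int) + 1 := by ring
    simp only [pvStepB, h1, h2, hidx]
    have hgoal : (if pvPref a1 (i+t+1) - pvPref a1 i = pvPref a2 (i+t+1) - pvPref a2 i
        then max (pvBI a1 a2 i ml t) ((t : Int) + 1) else pvBI a1 a2 i ml t)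
        = pvBI a1 a2 i ml (t+1) := by
      rw [pvBI]
      by_cases hd : pvD a1 a2 (i+t+1) = pvD a1 a2 i
      · rw [if_pos (by unfold pvD at hd; omega), if_pos hd]
      · rw [if_neg (by unfold pvD at hd; omega), if_neg hd]
    rw [hgoal]

lemma B_outer (a1 a2 : List Int) (n : ℕ) :
    ∀ k, k ≤ n →
    (List.range k).foldl
      (fun ml (j : ℕ) => ((PySem.List.pyRange (j : Int) (n : Int) 1).foldl
        (pvStepB a1 a2 (j : Int)) (ml, 0, 0)).1) 0
    = pvW a1 a2 n k := by
  intro k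
  induction k with
  | zero => intro _; simp [pvW]
  | succ k ih =>
    intro hk
    rw [List.range_succ, List.foldl_append, ih (by omega), List.foldl_cons, List.foldl_nil]
    have hr : PySem.List.pyRange (k : Int) (n : Int) 1
        = (List.range (n-k)).map (fun u : ℕ => (k : Int) + (u : Int)) := by
      rw [PySem.List.pyRange_one]
      have : ((n : Int) - (k : Int)).toNat = n - k := by omega
      rw [this]
    rw [hr, List.foldl_map, B_inner_run]
    rw [pvW]

lemma B_eq_pvW (a1 a2 : List Int) :
    longestCommonSum_alt a1 a2 = pvW a1 a2 a1.length a1.length := by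
  show ((PySem.List.pyRange 0 (PySem.List.len a1) 1).foldl
      (fun ml i => ((PySem.List.pyRange i (PySem.List.len a1) 1).foldl
        (pvStepB a1 a2 i) (ml, 0, 0)).1) 0) = pvW a1 a2 a1.length a1.length
  rw [PySem.List.len]
  conv_lhs => rw [PySem.List.pyRange_one]
  simp only [sub_zero, Int.toNat_natCast, List.foldl_map, zero_add]
  exact B_outer a1 a2 a1.length a1.length le_rfl

lemma pvBI_ge (a1 a2 : List Int) (i : ℕ) (ml : Int) (t : ℕ) : ml ≤ pvBI a1 a2 i ml t := by
  induction t with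
  | zero => simp [pvBI]
  | succ t ih =>
    unfold pvBI; split
    · exact le_trans ih (le_max_left _ _)
    · exact ih

lemma pvBI_cases (a1 a2 : List Int) (i : ℕ) (ml : Int) (t : ℕ) :
    pvBI a1 a2 i ml t = ml ∨
    ∃ t' < t, pvD a1 a2 (i+t'+1) = pvD a1 a2 i ∧ pvBI a1 a2 i ml t = (t' : Int) + 1 := by
  induction t with
  | zero => left; rfl
  | succ t ih =>
    unfold pvBI; split
    · rename_i h
      rcases max_choice (pvBI a1 a2 i ml t) ((t : Int) + 1) with hm | hm <;> rw [hm]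
      · rcases ih with h0 | ⟨t', ht', hd, he⟩
        · exact Or.inl h0
        · exact Or.inr ⟨t', Nat.lt_succ_of_lt ht', hd, he⟩
      · exact Or.inr ⟨t, Nat.lt_succ_self t, h, rfl⟩
    · rcases ih with h0 | ⟨t', ht', hd, he⟩
      · exact Or.inl h0
      · exact Or.inr ⟨t', Nat.lt_succ_of_lt ht', hd, he⟩

lemma pvBI_ub (a1 a2 : List Int) (i : ℕ) (ml : Int) (t t' : ℕ)
    (h1 : t' < t) (h2 : pvD a1 a2 (i+t'+1) = pvD a1 a2 i) :
    (t' : Int) + 1 ≤ pvBI a1 a2 i ml t := by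
  induction t with
  | zero => omega
  | succ t ih =>
    unfold pvBI
    rcases Nat.lt_succ_iff_lt_or_eq.mp h1 with h | h
    · split
      · exact le_trans (ih h) (le_max_left _ _)
      · exact ih h
    · subst h; rw [if_pos h2]; exact le_max_right _ _

lemma pvW_step_le (a1 a2 : List Int) (n i : ℕ) : pvW a1 a2 n i ≤ pvW a1 a2 n (i+1) := by
  rw [pvW]
  exact pvBI_ge a1 a2 i _ _

lemma pvW_mono (a1 a2 : List Int) (n : ℕ) {i i' : ℕ} (h : i ≤ i') :
    pvW a1 a2 n i ≤ pvW a1 a2 n i' := by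
  induction i', h using Nat.le_induction with
  | base => exact le_refl _
  | succ i' hi ih => exact le_trans ih (pvW_step_le a1 a2 n i')

lemma pvM_succ (a1 a2 : List Int) (k : ℕ) :
    pvM a1 a2 (k+1) = max (pvM a1 a2 k) ((k : Int) + 1 - (pvFirst a1 a2 (k+1) : Int)) := rfl

lemma pvM_rep (a1 a2 : List Int) (k : ℕ) :
    pvM a1 a2 k = 0 ∨ ∃ p q : ℕ, p < q ∧ q ≤ k ∧ pvD a1 a2 p = pvD a1 a2 q ∧
      pvM a1 a2 k = (q : Int) - (p : Int) := by
  induction k with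
  | zero => left; rfl
  | succ k ih =>
    rw [pvM_succ]
    rcases max_choice (pvM a1 a2 k) ((k : Int) + 1 - (pvFirst a1 a2 (k+1) : Int)) with hm | hm <;> rw [hm]
    · rcases ih with h | ⟨p, q, h1, h2, h3, h4⟩
      · exact Or.inl h
      · exact Or.inr ⟨p, q, h1, le_trans h2 (Nat.le_succ k), h3, h4⟩
    · by_cases hf : pvFirst a1 a2 (k+1) = k+1
      · left; rw [hf]; push_cast; ring
      · right
        refine ⟨pvFirst a1 a2 (k+1), k+1, ?_, le_refl _, pvFirst_spec a1 a2 (k+1), by push_cast; ring⟩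
        exact lt_of_le_of_ne (pvFirst_le a1 a2 (k+1)) hf

lemma pvM_ub (a1 a2 : List Int) (k : ℕ) :
    ∀ p q : ℕ, p < q → q ≤ k → pvD a1 a2 p = pvD a1 a2 q → (q : Int) - (p : Int) ≤ pvM a1 a2 k := by
  induction k with
  | zero => intro p q hpq hq _; omega
  | succ k ih =>
    intro p q hpq hq hd
    rw [pvM_succ]
    by_cases hqk : q ≤ k
    · exact le_trans (ih p q hpq hqk hd) (le_max_left _ _)
    · have hq1 : q = k+1 := by omega
      subst hq1
      have hfle := pvFirst_min a1 a2 hd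
      refine le_trans ?_ (le_max_right _ _)
      omega

lemma pvM_good (a1 a2 : List Int) (n : ℕ) : pvGood a1 a2 n (pvM a1 a2 n) :=
  ⟨pvM_rep a1 a2 n, pvM_ub a1 a2 n⟩

lemma pvW_rep (a1 a2 : List Int) (n : ℕ) :
    ∀ i, i ≤ n → pvW a1 a2 n i = 0 ∨ ∃ p q : ℕ, p < q ∧ q ≤ n ∧ pvD a1 a2 p = pvD a1 a2 q ∧
      pvW a1 a2 n i = (q : Int) - (p : Int) := by
  intro i
  induction i with
  | zero => intro _; left; rfl
  | succ i ih =>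
    intro hi
    rw [pvW]
    rcases pvBI_cases a1 a2 i (pvW a1 a2 n i) (n-i) with h | ⟨t', ht', hd, he⟩
    · rw [h]; exact ih (by omega)
    · rw [he]
      right
      exact ⟨i, i+t'+1, by omega, by omega, hd.symm, by push_cast; ring⟩

lemma pvW_ub (a1 a2 : List Int) (n : ℕ) :
    ∀ p q : ℕ, p < q → q ≤ n → pvD a1 a2 p = pvD a1 a2 q → (q : Int) - (p : Int) ≤ pvW a1 a2 n n := by
  intro p q hpq hq hd
  have h1 : ((q-p-1 : ℕ) : Int) + 1 ≤ pvW a1 a2 n (p+1) := by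
    rw [pvW]
    apply pvBI_ub
    · omega
    · have : p + (q-p-1) + 1 = q := by omega
      rw [this]; exact hd.symm
  have h2 := pvW_mono a1 a2 n (show p+1 ≤ n by omega)
  have h3 : ((q-p-1 : ℕ) : Int) + 1 = (q : Int) - (p : Int) := by omega
  linarith

lemma pvW_good (a1 a2 : List Int) (n : ℕ) : pvGood a1 a2 n (pvW a1 a2 n n) :=
  ⟨pvW_rep a1 a2 n n le_rfl, pvW_ub a1 a2 n⟩

lemma pvGood_unique (a1 a2 : List Int) (n : ℕ) (x y : Int)
    (hx : pvGood a1 a2 n x) (hy : pvGood a1 a2 n y) : x = y := by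
  obtain ⟨hx1, hx2⟩ := hx
  obtain ⟨hy1, hy2⟩ := hy
  have hge : ∀ z : Int, (z = 0 ∨ ∃ p q : ℕ, p < q ∧ q ≤ n ∧ pvD a1 a2 p = pvD a1 a2 q ∧ z = (q : Int) - (p : Int)) →
      (∀ p q : ℕ, p < q → q ≤ n → pvD a1 a2 p = pvD a1 a2 q → (q : Int) - (p : Int) ≤ z) →
      ∀ w : Int, (w = 0 ∨ ∃ p q : ℕ, p < q ∧ q ≤ n ∧ pvD a1 a2 p = pvD a1 a2 q ∧ w = (q : Int) - (p : Int)) → w ≤ z := by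
    intro z hz1 hz2 w hw
    rcases hw with h0 | ⟨p, q, hpq, hqn, hd, he⟩
    · subst h0
      rcases hz1 with h0 | ⟨p, q, hpq, hqn, hd, he⟩
      · omega
      · have := hz2 p q hpq hqn hd; omega
    · subst he; exact hz2 p q hpq hqn hd
  exact le_antisymm (hge y hy1 hy2 x hx1) (hge x hx1 hx2 y hy1)

-- ===== VERDICT (by name: the statement is the Claim_ definition above) =====
theorem longestCommonSum_spec : Claim_equal_longestCommonSum := by
  intro a1 a2 _ _
  unfold Spec_longestCommonSum
  rw [A_eq_pvM, B_eq_pvW]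
  exact pvGood_unique a1 a2 a1.length _ _ (pvM_good a1 a2 a1.length) (pvW_good a1 a2 a1.length)
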